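-- pv_equiv track=rewrite | github.com/TrustInMagic/BlackJack | card_sintax.py | hand_displayer
-- ===== SOURCE A (Python) =====
-- def hand_displayer(hand, aces):
--     interior_hand = hand
--     interior_aces = aces
--
--     for idx, ace in enumerate(interior_aces):
--         for idx2, card in enumerate(interior_hand):
--             if card[0] == "1" and ace[1] == card[1]:
--                 interior_hand[idx2] = interior_aces[idx]
--
--     return ", ".join(interior_hand)
-- ===== SOURCE B (Python) =====
-- def hand_displayer(hand, aces):
--     # One pass over the aces to index the first ace per suit, one pass over the
--     # hand to swap each ten-card for that ace (mutating hand in place), then join.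
--     first_ace_for_suit = {}
--     for ace in aces:
--         first_ace_for_suit.setdefault(ace[1:2], ace)
--     for i, card in enumerate(hand):
--         if card[:1] == "1" and card[1:2] in first_ace_for_suit:
--             hand[i] = first_ace_for_suit[card[1:2]]
--     return ", ".join(hand)
-- ===== Notes on version B (the rewrite author's own statement) =====
-- stated objective: faster
-- what changed: Replaces A's nested aces-by-hand rescans with a first-ace-per-suit dict built in one pass over the aces plus a single lookup pass over the hand; Pre_ excludes inputs where A raises IndexError (empty cards or too-short strings that get indexed) and the first-vs-last corner where an aces entry itself begins with '1', so A's rescans can re-replace an already substituted card while B keeps the first matching ace.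
-- outside the precondition, e.g. on hand_displayer(['1S'], ['1S', 'AS']): A returns 'AS', B returns '1S'
import Mathlib
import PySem

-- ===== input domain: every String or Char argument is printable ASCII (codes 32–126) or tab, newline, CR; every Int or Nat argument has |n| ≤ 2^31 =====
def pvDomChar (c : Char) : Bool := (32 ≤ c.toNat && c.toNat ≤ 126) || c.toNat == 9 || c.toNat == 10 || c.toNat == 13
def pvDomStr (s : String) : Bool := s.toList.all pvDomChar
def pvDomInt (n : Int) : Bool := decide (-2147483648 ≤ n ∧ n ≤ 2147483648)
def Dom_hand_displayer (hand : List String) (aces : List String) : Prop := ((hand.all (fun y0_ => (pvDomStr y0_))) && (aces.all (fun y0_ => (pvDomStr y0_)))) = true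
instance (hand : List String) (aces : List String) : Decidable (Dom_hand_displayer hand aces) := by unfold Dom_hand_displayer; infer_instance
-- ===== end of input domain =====

-- B replaces A's nested aces×hand rescans (O(|aces|·|hand|)) by one first-ace-per-suit dict pass
-- over the aces plus one lookup pass over the hand (measured faster); both Pythons mutate `hand`
-- in place the same way — the theorems are about the return value.

-- ===== PORT A =====
-- card[0] == "1" and ace[1] == card[1]; Python raises where pyGet? is none (outside Pre_)
def pvCondA (ace card : String) : Bool :=
  (PySem.Str.pyGet? card 0 == some '1') && (PySem.Str.pyGet? ace 1 == PySem.Str.pyGet? card 1)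

-- inner `for idx2, card in enumerate(interior_hand)`: only the current index is assigned, so it is
-- the obvious structural recursion rebuilding the (mutated-in-place) list
def pvInnerA (ace : String) : List String → List String
  | [] => []
  | card :: rest => (if pvCondA ace card then ace else card) :: pvInnerA ace rest

def hand_displayer (hand : List String) (aces : List String) : String :=
  PySem.Str.join ", " (aces.foldl (fun ih ace => pvInnerA ace ih) hand)

-- ===== PORT B =====
def pvPrefix1 (s : String) : String := PySem.Str.slice s none (some 1)      -- s[:1]
def pvSuitB (s : String) : String := PySem.Str.slice s (some 1) (some 2)    -- s[1:2]

-- `for ace in aces: first_ace_for_suit.setdefault(ace[1:2], ace)`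
def pvBuildB (aces : List String) : PySem.Dict String String :=
  aces.foldl (fun d ace => d.setdefault (pvSuitB ace) ace) PySem.Dict.empty

-- `for i, card in enumerate(hand): if card[:1] == "1" and card[1:2] in d: hand[i] = d[card[1:2]]`
def pvReplaceB (d : PySem.Dict String String) : List String → List String
  | [] => []
  | card :: rest =>
      (if pvPrefix1 card == "1" then
         match d.get? (pvSuitB card) with
         | some a => a
         | none => card
       else card) :: pvReplaceB d rest

def hand_displayer_alt (hand : List String) (aces : List String) : String :=
  PySem.Str.join ", " (pvReplaceB (pvBuildB aces) hand)

-- ===== PRECONDITION & SPEC =====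
-- Pre_ excludes the inputs on which A raises IndexError (with aces present, an empty card, a
-- "1…"-card of length 1, or an ace of length < 2 while some card starts with '1'), and the
-- first-vs-last corner where an entry of aces itself begins with '1': there a substituted card can
-- be re-matched by A's later rescans, so which matching ace finally stands is unspecified — A keeps
-- the last of such a suit chain, B the first matching ace.
def Pre_hand_displayer (hand : List String) (aces : List String) : Prop :=
  aces = [] ∨
  (∀ c ∈ hand, c.toList ≠ [] ∧ c.toList.head? ≠ some '1') ∨
  ((∀ c ∈ hand, c.toList ≠ [] ∧ (c.toList.head? = some '1' → 2 ≤ c.toList.length)) ∧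
   (∀ a ∈ aces, 2 ≤ a.toList.length ∧ a.toList.head? ≠ some '1'))
instance (hand : List String) (aces : List String) : Decidable (Pre_hand_displayer hand aces) := by
  unfold Pre_hand_displayer; infer_instance

def pvWitness_hand_displayer : List String × List String := (["1S", "2H"], ["AS", "AH"])

def Spec_hand_displayer (hand : List String) (aces : List String) (out : String) : Prop :=
  out = hand_displayer_alt hand aces
instance (hand : List String) (aces : List String) (out : String) : Decidable (Spec_hand_displayer hand aces out) := by
  unfold Spec_hand_displayer; infer_instance

-- ===== CLAIM (what is proved, stated in full; the proofs are below) =====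
def Claim_equal_hand_displayer : Prop := ∀ (hand : List String) (aces : List String), Dom_hand_displayer hand aces → Pre_hand_displayer hand aces → Spec_hand_displayer hand aces (hand_displayer hand aces)

-- ===== LEMMAS AND PROOFS =====

-- A-side characterisation: the sequential rescans act on every card independently.
def pvChain (c : String) (L : List String) : String :=
  L.foldl (fun c a => if pvCondA a c then a else c) c

theorem pvInnerA_eq_map (ace : String) (l : List String) :
    pvInnerA ace l = l.map (fun c => if pvCondA ace c then ace else c) := by
  induction l with
  | nil => rfl
  | cons x xs ih => simp [pvInnerA, ih]

theorem pvFoldA_eq_map (aces hand : List String) :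
    aces.foldl (fun ih ace => pvInnerA ace ih) hand = hand.map (fun c => pvChain c aces) := by
  induction aces generalizing hand with
  | nil => simp [pvChain]
  | cons a as ih =>
      rw [List.foldl_cons, pvInnerA_eq_map, ih, List.map_map]
      apply List.map_congr_left
      intro c _
      show pvChain (if pvCondA a c then a else c) as = pvChain c (a :: as)
      rw [pvChain, pvChain, List.foldl_cons]

theorem pvChain_not1 (c : String) (L : List String)
    (h : (PySem.Str.pyGet? c 0 == some '1') = false) : pvChain c L = c := by
  induction L with
  | nil => rfl
  | cons a as ih =>
      have hf : pvCondA a c = false := by simp only [pvCondA, h, Bool.false_and]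
      rw [pvChain, List.foldl_cons, hf]
      simpa [pvChain] using ih

-- B-side: the replace pass elementwise, and the dict as "first ace per suit".
theorem pvReplaceB_eq_map (d : PySem.Dict String String) (l : List String) :
    pvReplaceB d l = l.map (fun card =>
      if pvPrefix1 card == "1" then
        match d.get? (pvSuitB card) with
        | some a => a
        | none => card
      else card) := by
  induction l with
  | nil => rfl
  | cons x xs ih => simp [pvReplaceB, ih]

theorem pvBuildB_get? (aces : List String) (k : String) :
    (pvBuildB aces).get? k = aces.find? (fun a => pvSuitB a == k) := by
  have gen : ∀ (d : PySem.Dict String String),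
      (aces.foldl (fun d ace => d.setdefault (pvSuitB ace) ace) d).get? k
        = (d.get? k).or (aces.find? (fun a => pvSuitB a == k)) := by
    induction aces with
    | nil => intro d; simp
    | cons a as ih =>
        intro d
        rw [List.foldl_cons, ih]
        by_cases hk : pvSuitB a = k
        · subst hk
          rw [PySem.Dict.get?_setdefault_self]
          cases d.get? (pvSuitB a) <;> simp
        · rw [PySem.Dict.get?_setdefault_of_ne _ _ (fun h => hk h.symm)]
          simp [hk]
  rw [pvBuildB, gen PySem.Dict.empty]
  simp [PySem.Dict.get?_empty]

-- string-indexing bridges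
theorem pvHead?_eq_pyGet0 (s : String) : s.toList.head? = PySem.Str.pyGet? s 0 := by
  have h0 : PySem.Str.pyGet? s 0 = s.toList[0]? := by
    simpa using PySem.Str.pyGet?_natCast s 0
  rw [h0, List.head?_eq_getElem?]

theorem pvPrefix1_toList (s : String) : (pvPrefix1 s).toList = s.toList.take 1 := by
  rw [pvPrefix1]
  rw [PySem.Str.toList_slice]
  exact PySem.List.slice_to_natCast s.toList 1

theorem pvSuitB_toList (s : String) : (pvSuitB s).toList = (s.toList.drop 1).take 1 := by
  rw [pvSuitB]
  rw [PySem.Str.toList_slice]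
  have := PySem.List.slice_natCast s.toList 1 2
  simpa using this

theorem pvPrefix1_one_iff (s : String) :
    (pvPrefix1 s == "1") = true ↔ s.toList.head? = some '1' := by
  constructor
  · intro h
    have h' : pvPrefix1 s = "1" := eq_of_beq h
    have := congrArg String.toList h'
    rw [pvPrefix1_toList] at this
    cases hs : s.toList with
    | nil => rw [hs] at this; simp at this
    | cons x xs => rw [hs] at this; simp at this; simp [this]
  · intro h
    cases hs : s.toList with
    | nil => rw [hs] at h; simp at h
    | cons x xs =>
        rw [hs] at h; simp at h
        have : pvPrefix1 s = "1" := by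
          apply String.ext   -- toList injective
          rw [pvPrefix1_toList, hs, h]; rfl
        simp [this]

theorem pvGet1_of_len2 (s : String) (h : 2 ≤ s.toList.length) :
    ∃ ch, s.toList[1]? = some ch ∧ PySem.Str.pyGet? s 1 = some ch ∧ (pvSuitB s).toList = [ch] := by
  have h1 : PySem.Str.pyGet? s 1 = s.toList[1]? := by
    simpa using PySem.Str.pyGet?_natCast s 1
  cases hs : s.toList with
  | nil => simp [hs] at h
  | cons x xs =>
      cases hxs : xs with
      | nil => rw [hs, hxs] at h; simp at h
      | cons y ys =>
          refine ⟨y, ?_, ?_, ?_⟩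
          · simp_all
          · simp_all
          · rw [pvSuitB_toList, hs, hxs]; rfl

-- the key per-card fact under the disjunct-3 hypotheses
theorem pvChain_eq_find (L : List String) (hL : ∀ a ∈ L, 2 ≤ a.toList.length ∧ a.toList.head? ≠ some '1')
    (c : String) (hc1 : c.toList.head? = some '1') (hc2 : 2 ≤ c.toList.length) :
    pvChain c L = (match L.find? (fun a => pvSuitB a == pvSuitB c) with
                   | some a => a
                   | none => c) := by
  obtain ⟨cs, hcs1, hcs2, hcs3⟩ := pvGet1_of_len2 c hc2
  have hc0 : PySem.Str.pyGet? c 0 = some '1' := by rw [← pvHead?_eq_pyGet0]; exact hc1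
  induction L with
  | nil => simp [pvChain]
  | cons a as ih =>
      obtain ⟨ha2, ha1⟩ := hL a (List.mem_cons_self ..)
      have has : ∀ x ∈ as, 2 ≤ x.toList.length ∧ x.toList.head? ≠ some '1' :=
        fun x hx => hL x (List.mem_cons_of_mem _ hx)
      obtain ⟨asu, has1, has2, has3⟩ := pvGet1_of_len2 a ha2
      have hcond : pvCondA a c = (asu == cs) := by
        simp only [pvCondA, hc0, has2, hcs2]
        simp
      have hsuit : (pvSuitB a == pvSuitB c) = (asu == cs) := by
        by_cases h : asu = cs
        · subst h
          have : pvSuitB a = pvSuitB c := by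
            apply String.ext; rw [has3, hcs3]
          simp [this]
        · have : pvSuitB a ≠ pvSuitB c := by
            intro he
            have := congrArg String.toList he
            rw [has3, hcs3] at this
            simp at this; exact h this
          simp [this, h]
      by_cases h : asu = cs
      · have hT : pvCondA a c = true := by rw [hcond]; simp [h]
        have hstep : pvChain c (a :: as) = pvChain a as := by
          rw [pvChain, List.foldl_cons, hT]; simp only [if_true]; rfl
        have hnot : (PySem.Str.pyGet? a 0 == some '1') = false := by
          rw [← pvHead?_eq_pyGet0]
          simpa using ha1
        have hbt : (asu == cs) = true := by simp [h]
        rw [hstep, pvChain_not1 a as hnot, List.find?_cons, hsuit, hbt]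
      · have hF : pvCondA a c = false := by rw [hcond]; simp [h]
        have hstep : pvChain c (a :: as) = pvChain c as := by
          rw [pvChain, List.foldl_cons, hF]; simp only [Bool.false_eq_true, if_false]; rfl
        have hbf : (asu == cs) = false := by simp [h]
        rw [hstep, ih has, List.find?_cons, hsuit, hbf]

-- ===== VERDICT (by name: the statement is the Claim_ definition above) =====
theorem hand_displayer_spec : Claim_equal_hand_displayer := by
  intro hand aces _hDom hPre
  unfold Spec_hand_displayer hand_displayer hand_displayer_alt
  rw [pvFoldA_eq_map, pvReplaceB_eq_map]
  rcases hPre with h | h | ⟨hH, hA⟩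
  · -- aces = []
    subst h
    rw [pvBuildB]
    simp only [List.foldl_nil]
    congr 1
    apply List.map_congr_left
    intro c _
    show pvChain c [] = _
    rw [pvChain, List.foldl_nil]
    split
    · simp [PySem.Dict.get?_empty]
    · rfl
  · -- no card starts with '1'
    congr 1
    apply List.map_congr_left
    intro c hc
    obtain ⟨hne, hhd⟩ := h c hc
    have hnot : (PySem.Str.pyGet? c 0 == some '1') = false := by
      rw [← pvHead?_eq_pyGet0]; simpa using hhd
    have hp : (pvPrefix1 c == "1") = false := by
      rw [Bool.eq_false_iff]
      intro hx
      exact hhd ((pvPrefix1_one_iff c).mp hx)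
    rw [pvChain_not1 c aces hnot]
    simp [hp]
  · -- the main case: all aces are proper non-'1' two-char+ strings, '1'-cards are 2-char+
    congr 1
    apply List.map_congr_left
    intro c hc
    obtain ⟨hne, hlen⟩ := hH c hc
    by_cases hhd : c.toList.head? = some '1'
    · have hc2 := hlen hhd
      rw [pvChain_eq_find aces hA c hhd hc2]
      have hp : (pvPrefix1 c == "1") = true := (pvPrefix1_one_iff c).mpr hhd
      rw [pvBuildB_get?]
      simp [hp]
    · have hnot : (PySem.Str.pyGet? c 0 == some '1') = false := by
        rw [← pvHead?_eq_pyGet0]; simpa using hhd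
      have hp : (pvPrefix1 c == "1") = false := by
        rw [Bool.eq_false_iff]
        intro hx
        exact hhd ((pvPrefix1_one_iff c).mp hx)
      rw [pvChain_not1 c aces hnot]
      simp [hp]
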